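-- pv_equiv track=rewrite | github.com/josephsayegh/RIW | CACM/boolean_research.py | intersect_many
-- ===== SOURCE A (Python) =====
-- def intersect(list_1, list_2):
--     """
--     fonction qui mange 2 listes tries et qui donne une liste representant
--     l'intersection des 2 listes
--     IL FAUT TRIER LES LISTES AVANT
--     """
--     intersection = []
--     while len(list_1) != 0 and len(list_2) != 0:
--         if list_1[0] == list_2[0]:
--             intersection.append(list_1[0])
--             list_1 = list_1[1:]
--             list_2 = list_2[1:]
--         elif list_1[0] < list_2[0]:
--             list_1 = list_1[1:]
--         else:
--             list_2 = list_2[1:]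
--     return intersection
--
-- def intersect_many(list_of_lists):
--     """
--     fonction qui applique intersect a une liste de liste, 2 a 2
--     """
--     while len(list_of_lists) > 1:
--         list_of_lists[1] = intersect(list_of_lists[0], list_of_lists[1])
--         list_of_lists.pop(0)
--     try:
--         return list_of_lists[0]
--     except IndexError:
--         return []
-- ===== SOURCE B (Python) =====
-- def intersect_many(list_of_lists):
--     """Fold a two-pointer merge intersection over the lists (indices, no slicing).
--     Unlike A, does not mutate list_of_lists; return value is identical."""
--     if not list_of_lists:
--         return []
--     acc = list_of_lists[0]
--     for lst in list_of_lists[1:]: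
--         i = j = 0
--         out = []
--         while i < len(acc) and j < len(lst):
--             a, b = acc[i], lst[j]
--             if a == b:
--                 out.append(a)
--                 i += 1
--                 j += 1
--             elif a < b:
--                 i += 1
--             else:
--                 j += 1
--         acc = out
--     return acc
-- ===== Notes on version B (the rewrite author's own statement) =====
-- stated objective: faster
-- what changed: Replaces A's destructive while/pop loop whose pairwise intersect repeatedly copies both lists by slicing (list[1:]) with a non-mutating fold of a two-pointer merge using index variables, removing all slice copies.
import Mathlib
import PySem

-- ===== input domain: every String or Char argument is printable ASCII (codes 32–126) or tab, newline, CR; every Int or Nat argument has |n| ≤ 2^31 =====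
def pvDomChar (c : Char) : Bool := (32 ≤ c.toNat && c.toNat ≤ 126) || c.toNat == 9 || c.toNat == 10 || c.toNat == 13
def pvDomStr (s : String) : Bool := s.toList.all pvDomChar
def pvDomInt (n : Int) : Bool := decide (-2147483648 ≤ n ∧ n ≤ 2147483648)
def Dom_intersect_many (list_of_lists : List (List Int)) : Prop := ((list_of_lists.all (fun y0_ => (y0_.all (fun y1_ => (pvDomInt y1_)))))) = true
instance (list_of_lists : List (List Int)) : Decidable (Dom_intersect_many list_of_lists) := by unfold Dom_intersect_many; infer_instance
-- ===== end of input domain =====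

-- ===== PORT A =====
-- B removes A's list-slicing and in-place pop loop; return value proved equal. A mutates its
-- argument (pops it empty); the equivalence proved here is about the return value only.
-- (fuel = exact list sizes, a totality guard only: each loop consumes one element per step)
def intersectFuel (fuel : Nat) (l1 l2 acc : List Int) : List Int :=
  match fuel, l1, l2 with
  | f+1, a :: t1, b :: t2 =>
      if a = b then intersectFuel f t1 t2 (acc ++ [a])
      else if a < b then intersectFuel f t1 (b :: t2) acc
      else intersectFuel f (a :: t1) t2 acc
  | _, _, _ => acc

def intersectA (l1 l2 acc : List Int) : List Int :=
  intersectFuel (l1.length + l2.length) l1 l2 acc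

def imFuel (fuel : Nat) (l : List (List Int)) : List Int :=
  match fuel, l with
  | f+1, x :: y :: rest => imFuel f (intersectA x y [] :: rest)
  | _, x :: _ => x
  | _, [] => []

def intersect_many (list_of_lists : List (List Int)) : List Int :=
  imFuel list_of_lists.length list_of_lists

-- ===== PORT B =====
-- two-pointer merge with index variables (no slicing), as in Source B; fuel is a totality guard
def twoPtrFuel (fuel : Nat) (xs ys : List Int) (i j : Nat) (out : List Int) : List Int :=
  match fuel with
  | 0 => out
  | f+1 =>
    if h : i < xs.length ∧ j < ys.length then
      if xs[i] = ys[j] then twoPtrFuel f xs ys (i+1) (j+1) (out ++ [xs[i]])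
      else if xs[i] < ys[j] then twoPtrFuel f xs ys (i+1) j out
      else twoPtrFuel f xs ys i (j+1) out
    else out

def twoPtr (xs ys : List Int) (i j : Nat) (out : List Int) : List Int :=
  twoPtrFuel (xs.length + ys.length) xs ys i j out

def intersect_many_alt (list_of_lists : List (List Int)) : List Int :=
  match list_of_lists with
  | [] => []
  | x :: rest => rest.foldl (fun acc l => twoPtr acc l 0 0 []) x

-- ===== PRECONDITION & SPEC =====
def Spec_intersect_many (list_of_lists : List (List Int)) (out : List Int) : Prop := out = intersect_many_alt list_of_lists
instance (list_of_lists : List (List Int)) (out : List Int) : Decidable (Spec_intersect_many list_of_lists out) := by unfold Spec_intersect_many; infer_instance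

-- ===== CLAIM (what is proved, stated in full; the proofs are below) =====
def Claim_equal_intersect_many : Prop := ∀ (list_of_lists : List (List Int)), Dom_intersect_many list_of_lists → Spec_intersect_many list_of_lists (intersect_many list_of_lists)

-- ===== LEMMAS AND PROOFS =====

theorem twoPtrFuel_eq (f : Nat) : ∀ (xs ys : List Int) (i j : Nat) (out : List Int),
    (xs.length - i) + (ys.length - j) ≤ f →
    twoPtrFuel f xs ys i j out = intersectFuel f (xs.drop i) (ys.drop j) out := by
  induction f with
  | zero =>
      intro xs ys i j out hb
      rw [List.drop_eq_nil_of_le (by omega), List.drop_eq_nil_of_le (by omega)]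
      rfl
  | succ f ih =>
      intro xs ys i j out hb
      by_cases h : i < xs.length ∧ j < ys.length
      · rw [twoPtrFuel, dif_pos h,
          List.drop_eq_getElem_cons h.1, List.drop_eq_getElem_cons h.2, intersectFuel]
        by_cases hab : xs[i] = ys[j]
        · rw [if_pos hab, if_pos hab, ih xs ys (i+1) (j+1) (out ++ [xs[i]]) (by omega)]
        · rw [if_neg hab, if_neg hab]
          by_cases hlt : xs[i] < ys[j]
          · rw [if_pos hlt, if_pos hlt, ih xs ys (i+1) j out (by omega),
              ← List.drop_eq_getElem_cons h.2]
          · rw [if_neg hlt, if_neg hlt, ih xs ys i (j+1) out (by omega),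
              ← List.drop_eq_getElem_cons h.1]
      · rw [twoPtrFuel, dif_neg h]
        rcases Decidable.not_and_iff_or_not.mp h with h1 | h1
        · rw [List.drop_eq_nil_of_le (show xs.length ≤ i by omega)]
          cases ys.drop j <;> rfl
        · rw [List.drop_eq_nil_of_le (show ys.length ≤ j by omega)]
          cases xs.drop i <;> rfl

theorem step_eq (x y : List Int) : twoPtr x y 0 0 [] = intersectA x y [] := by
  unfold twoPtr intersectA
  rw [twoPtrFuel_eq (x.length + y.length) x y 0 0 [] (by omega)]
  simp

theorem main_eq (rest : List (List Int)) (x : List Int) :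
    intersect_many (x :: rest) = rest.foldl (fun acc l => twoPtr acc l 0 0 []) x := by
  induction rest generalizing x with
  | nil => rfl
  | cons y rest ih =>
      show imFuel (rest.length + 1 + 1) (x :: y :: rest) = _
      rw [imFuel, List.foldl_cons, step_eq]
      exact ih (intersectA x y [])

-- ===== VERDICT (by name: the statement is the Claim_ definition above) =====
theorem intersect_many_spec : Claim_equal_intersect_many := by
  intro lol _
  unfold Spec_intersect_many intersect_many_alt
  cases lol with
  | nil => rfl
  | cons x rest => exact main_eq rest x
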